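-- pv_equiv track=rewrite | github.com/daniel-reich/ubiquitous-fiesta | qeyinsjZHCPEddbfe_22.py | dice_game
-- ===== SOURCE A (Python) =====
-- def dice_game(lst):
--   total = 0
--   for roll in lst:
--     if roll[0] == roll[1]:
--       return 0
--     else:
--       total += sum(roll)
--   return total
-- ===== SOURCE B (Python) =====
-- def _total(lst):
--   # Divide and conquer; None means "a double occurs somewhere in this segment".
--   if not lst:
--     return 0
--   if len(lst) == 1:
--     a, b = lst[0]
--     return None if a == b else a + b
--   mid = len(lst) // 2
--   l = _total(lst[:mid])
--   r = _total(lst[mid:])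
--   return None if l is None or r is None else l + r
--
-- def dice_game(lst):
--   t = _total(lst)
--   return 0 if t is None else t
-- ===== Notes on version B (the rewrite author's own statement) =====
-- stated objective: alternative
-- what changed: Replaces A's fused left-to-right accumulator loop with early return by a divide-and-conquer recursion: the list is split in halves, each half yields None (a double occurs) or its segment sum, results are combined with a None-absorbing addition, and the wrapper maps None to 0.
import Mathlib
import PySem

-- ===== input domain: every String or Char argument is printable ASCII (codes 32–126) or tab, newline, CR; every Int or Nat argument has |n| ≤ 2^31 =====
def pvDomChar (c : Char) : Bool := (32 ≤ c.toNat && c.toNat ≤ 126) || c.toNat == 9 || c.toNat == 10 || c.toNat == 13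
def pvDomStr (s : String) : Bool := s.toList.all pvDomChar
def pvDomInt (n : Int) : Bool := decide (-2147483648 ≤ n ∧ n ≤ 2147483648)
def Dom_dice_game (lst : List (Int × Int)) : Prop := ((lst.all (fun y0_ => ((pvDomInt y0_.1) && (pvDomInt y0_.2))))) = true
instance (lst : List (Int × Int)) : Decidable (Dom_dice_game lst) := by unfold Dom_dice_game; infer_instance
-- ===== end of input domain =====

-- B replaces A's fused left-to-right accumulator loop (early return 0 on a double) by a
-- divide-and-conquer recursion combining half-results with a None-absorbing addition. Objective: alternative.

-- ===== PORT A =====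
-- literal transliteration of A's loop: accumulator total, early return 0 on a double
def diceGameLoop : List (Int × Int) → Int → Int
  | [], total => total
  | roll :: rest, total =>
    if roll.1 = roll.2 then 0
    else diceGameLoop rest (total + (roll.1 + roll.2))

def dice_game (lst : List (Int × Int)) : Int :=
  diceGameLoop lst 0

-- ===== PORT B =====
-- port of Source B's _total: divide and conquer, none = "a double occurs in this segment"
def diceTotal? (lst : List (Int × Int)) : Option Int :=
  match h : lst with
  | [] => some 0
  | [(a, b)] => if a = b then none else some (a + b)
  | _ :: _ :: _ =>
    let mid := lst.length / 2
    match diceTotal? (lst.take mid), diceTotal? (lst.drop mid) with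
    | some l, some r => some (l + r)
    | _, _ => none
termination_by lst.length
decreasing_by
  · simp_all [List.length_take]; omega
  · simp_all [List.length_drop]; omega

def dice_game_alt (lst : List (Int × Int)) : Int :=
  match diceTotal? lst with
  | none => 0
  | some t => t

-- ===== PRECONDITION & SPEC =====
def Spec_dice_game (lst : List (Int × Int)) (out : Int) : Prop := out = dice_game_alt lst
instance (lst : List (Int × Int)) (out : Int) : Decidable (Spec_dice_game lst out) := by unfold Spec_dice_game; infer_instance

-- ===== CLAIM (what is proved, stated in full; the proofs are below) =====
def Claim_equal_dice_game : Prop := ∀ (lst : List (Int × Int)), Dom_dice_game lst → Spec_dice_game lst (dice_game lst)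

-- ===== LEMMAS AND PROOFS =====

-- characterisation of B's divide-and-conquer helper
theorem diceTotal?_eq (lst : List (Int × Int)) :
    diceTotal? lst =
      if lst.any (fun r => r.1 == r.2) then none
      else some ((lst.map (fun r => r.1 + r.2)).sum) := by
  induction hn : lst.length using Nat.strong_induction_on generalizing lst with
  | _ n ih =>
    match lst with
    | [] => simp [diceTotal?]
    | [(a, b)] => by_cases h : a = b <;> simp [diceTotal?, h]
    | p :: q :: rest =>
      rw [diceTotal?]
      have hlen : (p :: q :: rest).length = n := hn
      have hmidlt : (p :: q :: rest).length / 2 < n := by simp at hlen; omega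
      have hmidpos : 1 ≤ (p :: q :: rest).length / 2 := by simp at hlen ⊢; omega
      set mid := (p :: q :: rest).length / 2 with hmid
      have htk : ((p :: q :: rest).take mid).length < n := by
        rw [List.length_take]; omega
      have hdr : ((p :: q :: rest).drop mid).length < n := by
        rw [List.length_drop]; omega
      have hsplit : (p :: q :: rest).take mid ++ (p :: q :: rest).drop mid = p :: q :: rest :=
        List.take_append_drop _ _
      have hor : (p :: q :: rest).any (fun r => r.1 == r.2)
          = (((p :: q :: rest).take mid).any (fun r => r.1 == r.2)
             || ((p :: q :: rest).drop mid).any (fun r => r.1 == r.2)) := by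
        conv_lhs => rw [← hsplit]
        rw [List.any_append]
      have hsum : ((p :: q :: rest).map (fun r => r.1 + r.2)).sum
          = (((p :: q :: rest).take mid).map (fun r => r.1 + r.2)).sum
            + (((p :: q :: rest).drop mid).map (fun r => r.1 + r.2)).sum := by
        conv_lhs => rw [← hsplit]
        rw [List.map_append, List.sum_append]
      rw [ih _ htk _ rfl, ih _ hdr _ rfl, hor, hsum]
      cases h1 : ((p :: q :: rest).take mid).any (fun r => r.1 == r.2) <;>
        cases h2 : ((p :: q :: rest).drop mid).any (fun r => r.1 == r.2) <;>
          simp [h1, h2]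

-- characterisation of A's loop
theorem loop_eq (lst : List (Int × Int)) (total : Int) :
    diceGameLoop lst total =
      if lst.any (fun r => r.1 == r.2) then 0
      else total + (lst.map (fun r => r.1 + r.2)).sum := by
  induction lst generalizing total with
  | nil => simp [diceGameLoop]
  | cons roll rest ih =>
    simp only [diceGameLoop, List.any_cons, List.map_cons, List.sum_cons]
    by_cases h : roll.1 = roll.2
    · simp [h]
    · have hb : (roll.1 == roll.2) = false := by simp [h]
      rw [ih, hb]
      simp only [Bool.false_or]
      split_ifs with h2
      · rfl
      · ring

-- ===== VERDICT (by name: the statement is the Claim_ definition above) =====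
theorem dice_game_spec : Claim_equal_dice_game := by
  intro lst _
  unfold Spec_dice_game dice_game dice_game_alt
  rw [loop_eq, diceTotal?_eq]
  split_ifs with h <;> simp
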